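-- pv_equiv track=rewrite | github.com/akiladonz/QuarterPlus | Quarter+.py | ScoreUp_Calculation
-- ===== SOURCE A (Python) =====
-- def ScoreUp_Calculation(Score_byProteins):
--           Prediction_Score_Up=[]
--           scoreup=0
--           b = 0
--           for Score_byProtein in Score_byProteins:
--                       for b in range(0,len(Score_byProtein),1):
--                                      if b == 0: scoreup =  Score_byProtein[0]
--                                      else: scoreup =  Score_byProtein[b-1]
--                                      Prediction_Score_Up.append(scoreup)
--           return Prediction_Score_Up
-- ===== SOURCE B (Python) =====
-- def ScoreUp_Calculation(Score_byProteins):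
--     Prediction_Score_Up = []
--     for p in Score_byProteins:
--         if p:
--             Prediction_Score_Up += [p[0]] + p[:-1]
--     return Prediction_Score_Up
-- ===== Notes on version B (the rewrite author's own statement) =====
-- stated objective: simpler
-- what changed: Replaces the inner index loop with its b==0 special case by directly building each list's right-shifted sequence as [p[0]] + p[:-1] and extending the result once per list (bulk slice/extend instead of per-element indexing and append).
import Mathlib
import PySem

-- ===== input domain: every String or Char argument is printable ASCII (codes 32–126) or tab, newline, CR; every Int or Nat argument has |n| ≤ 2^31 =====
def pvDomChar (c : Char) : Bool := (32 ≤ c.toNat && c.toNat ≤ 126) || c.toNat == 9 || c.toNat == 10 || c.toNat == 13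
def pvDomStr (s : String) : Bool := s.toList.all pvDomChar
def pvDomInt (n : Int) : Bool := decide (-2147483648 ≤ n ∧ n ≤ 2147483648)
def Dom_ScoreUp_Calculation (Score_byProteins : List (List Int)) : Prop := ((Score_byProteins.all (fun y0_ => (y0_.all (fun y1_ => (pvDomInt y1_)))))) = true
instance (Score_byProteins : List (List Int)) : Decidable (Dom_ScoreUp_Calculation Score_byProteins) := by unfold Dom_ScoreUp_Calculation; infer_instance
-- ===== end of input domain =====

-- B replaces A's inner index loop and its b==0 special case with a per-list slice [p[0]] + p[:-1] (simpler decomposition, same cost).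

-- ===== PORT A =====
def ScoreUp_Calculation (Score_byProteins : List (List Int)) : List Int :=
  Score_byProteins.foldl (fun acc Score_byProtein =>
    (PySem.List.pyRange 0 (Score_byProtein.length : Int) 1).foldl (fun acc2 b =>
      acc2 ++ [if b = 0 then PySem.List.pyGetD Score_byProtein 0 0
               else PySem.List.pyGetD Score_byProtein (b - 1) 0]) acc) []

-- ===== PORT B =====
def ScoreUp_Calculation_alt (Score_byProteins : List (List Int)) : List Int :=
  Score_byProteins.foldl (fun acc p =>
    if p.isEmpty then acc
    else acc ++ PySem.List.pyGetD p 0 0 :: PySem.List.slice p none (some (-1))) []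

-- ===== PRECONDITION & SPEC =====
def Spec_ScoreUp_Calculation (Score_byProteins : List (List Int)) (out : List Int) : Prop := out = ScoreUp_Calculation_alt Score_byProteins
instance (Score_byProteins : List (List Int)) (out : List Int) : Decidable (Spec_ScoreUp_Calculation Score_byProteins out) := by unfold Spec_ScoreUp_Calculation; infer_instance

-- ===== CLAIM (what is proved, stated in full; the proofs are below) =====
def Claim_equal_ScoreUp_Calculation : Prop := ∀ (Score_byProteins : List (List Int)), Dom_ScoreUp_Calculation Score_byProteins → Spec_ScoreUp_Calculation Score_byProteins (ScoreUp_Calculation Score_byProteins)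

-- ===== LEMMAS AND PROOFS =====

-- range-of-getD prefix characterisation
theorem map_range_getD_take (xs : List Int) (n : Nat) (h : n ≤ xs.length) :
    (List.range n).map (fun k => xs.getD k 0) = xs.take n := by
  apply List.ext_getElem
  · simp [h]
  · intro i h1 h2
    simp at h1 h2 ⊢
    rw [List.getElem?_eq_getElem (by omega : i < xs.length)]
    rfl

-- per-list step of A equals per-list step of B
theorem step_eq (p : List Int) (acc : List Int) :
    (PySem.List.pyRange 0 (p.length : Int) 1).foldl (fun acc2 b =>
      acc2 ++ [if b = 0 then PySem.List.pyGetD p 0 0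
               else PySem.List.pyGetD p (b - 1) 0]) acc
    = if p.isEmpty then acc
      else acc ++ PySem.List.pyGetD p 0 0 :: PySem.List.slice p none (some (-1)) := by
  rw [PySem.List.foldl_append_singleton_eq_map]
  cases p with
  | nil => simp [PySem.List.pyRange_one_eq_nil]
  | cons h t =>
      rw [if_neg (by simp)]
      rw [PySem.List.slice_to_neg_one]
      have hlen : ((h :: t).length : Int) = (t.length : Int) + 1 := by simp
      rw [hlen, PySem.List.pyRange_one_cons (by omega)]
      simp only [List.map_cons, if_true]
      congr 1
      rw [PySem.List.pyRange_one]
      have : ((t.length : Int) + 1 - (0 + 1)).toNat = t.length := by omega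
      rw [this, List.map_map]
      have hmap : ∀ k : Nat, ((fun b => if b = 0 then PySem.List.pyGetD (h :: t) 0 0
              else PySem.List.pyGetD (h :: t) (b - 1) 0) ∘ fun k : Nat => (0 : Int) + 1 + k) k
            = (h :: t).getD k 0 := by
        intro k
        simp only [Function.comp]
        rw [if_neg (by omega)]
        have : (0 : Int) + 1 + (k : Int) - 1 = (k : Int) := by ring
        rw [this, PySem.List.pyGetD_natCast]
      rw [List.map_congr_left (fun k _ => hmap k),
          map_range_getD_take (h :: t) t.length (by simp),
          List.dropLast_eq_take]
      simp

theorem fold_eq (xs : List (List Int)) (acc : List Int) :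
    xs.foldl (fun acc p =>
      (PySem.List.pyRange 0 (p.length : Int) 1).foldl (fun acc2 b =>
        acc2 ++ [if b = 0 then PySem.List.pyGetD p 0 0
                 else PySem.List.pyGetD p (b - 1) 0]) acc) acc
    = xs.foldl (fun acc p =>
        if p.isEmpty then acc
        else acc ++ PySem.List.pyGetD p 0 0 :: PySem.List.slice p none (some (-1))) acc := by
  induction xs generalizing acc with
  | nil => rfl
  | cons p ps ih => rw [List.foldl_cons, List.foldl_cons, step_eq]; exact ih _

-- ===== VERDICT (by name: the statement is the Claim_ definition above) =====
theorem ScoreUp_Calculation_spec : Claim_equal_ScoreUp_Calculation := by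
  intro xs _
  unfold Spec_ScoreUp_Calculation ScoreUp_Calculation ScoreUp_Calculation_alt
  exact fold_eq xs []
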